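-- pv_equiv track=rewrite | github.com/tianyi2013/leetcode | python_code/minion_game.py | minion_game
-- ===== SOURCE A (Python) =====
-- def minion_game(string):
--     # your code goes here
--     def get_all_substrings(input_string):
--         return [input_string[0:i] for i in range(2, len(input_string)+1)]
--
--     def add_to_dict(dic, char, index, string):
--         if char in dic:
--             dic[char] += 1
--         else:
--             dic[char] = 1
--         for sub_string in get_all_substrings(string[index:]):
--             if sub_string in dic:
--                 dic[sub_string] += 1
--             else:
--                 dic[sub_string] = 1
--
--     stuart = {}
--     kevin = {}
--     for i, char in enumerate(string):
--         if char in ['A', 'E', 'I', 'O', 'U']: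
--             add_to_dict(kevin, char, i, string)
--         else:
--             add_to_dict(stuart, char, i, string)
--
--     # calculate the final score
--     kevin_score = sum(kevin.values())
--     stuart_score = sum(stuart.values())
--     if kevin_score > stuart_score:
--         return 'Kevin {}'.format(kevin_score)
--     elif kevin_score < stuart_score:
--         return 'Stuart {}'.format(stuart_score)
--     else:
--         return 'Draw'
-- ===== SOURCE B (Python) =====
-- def minion_game(string):
--     n = len(string)
--     kevin = 0
--     for i, c in enumerate(string):
--         if c in 'AEIOU':
--             kevin += n - i
--     stuart = n * (n + 1) // 2 - kevin
--     if kevin > stuart: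
--         return 'Kevin {}'.format(kevin)
--     elif kevin < stuart:
--         return 'Stuart {}'.format(stuart)
--     else:
--         return 'Draw'
-- ===== Notes on version B (the rewrite author's own statement) =====
-- stated objective: faster
-- what changed: B drops A's substring dictionaries entirely and scores each game with the closed form: every start index i contributes n-i substrings, so Kevin's score is the sum of n-i over vowel positions and Stuart's is n(n+1)/2 minus that, in one O(n) pass.
import Mathlib
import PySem

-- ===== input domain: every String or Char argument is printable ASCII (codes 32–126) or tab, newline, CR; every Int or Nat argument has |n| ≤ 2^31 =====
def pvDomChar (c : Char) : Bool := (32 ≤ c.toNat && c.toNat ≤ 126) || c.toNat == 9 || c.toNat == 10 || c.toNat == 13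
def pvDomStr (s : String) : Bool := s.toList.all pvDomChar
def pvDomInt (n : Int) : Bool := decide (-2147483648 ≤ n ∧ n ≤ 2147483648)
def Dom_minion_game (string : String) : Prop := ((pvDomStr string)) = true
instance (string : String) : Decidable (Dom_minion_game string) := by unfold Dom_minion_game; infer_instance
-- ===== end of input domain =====

-- B replaces A's substring dictionaries by the closed-form per-index scores
-- (each start index i contributes n - i substrings): O(n) instead of A's O(n^3) space/time.

-- ===== PORT A =====
def pvIncr (dic : PySem.Dict (List Char) Int) (k : List Char) : PySem.Dict (List Char) Int :=
  if dic.contains k then dic.insert k (dic.getD k 0 + 1) else dic.insert k 1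

def pvGetAllSubstrings (input : List Char) : List (List Char) :=
  (PySem.List.pyRange 2 ((input.length : Int) + 1) 1).map
    (fun i => PySem.List.slice input (some 0) (some i))

def pvAddToDict (dic : PySem.Dict (List Char) Int) (ch : Char) (index : Int)
    (s : List Char) : PySem.Dict (List Char) Int :=
  (pvGetAllSubstrings (PySem.List.slice s (some index) none)).foldl pvIncr (pvIncr dic [ch])

def minion_game (string : String) : String :=
  let s := string.toList
  let p := (PySem.List.enumerate s 0).foldl
    (fun (p : PySem.Dict (List Char) Int × PySem.Dict (List Char) Int) ic =>
      if ['A', 'E', 'I', 'O', 'U'].contains ic.2 then (p.1, pvAddToDict p.2 ic.2 ic.1 s)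
      else (pvAddToDict p.1 ic.2 ic.1 s, p.2))
    (PySem.Dict.empty, PySem.Dict.empty)
  let kevin_score := p.2.values.sum
  let stuart_score := p.1.values.sum
  if kevin_score > stuart_score then String.ofList ("Kevin ".toList ++ PySem.Int.toChars kevin_score)
  else if kevin_score < stuart_score then String.ofList ("Stuart ".toList ++ PySem.Int.toChars stuart_score)
  else "Draw"

-- ===== PORT B =====
def minion_game_alt (string : String) : String :=
  let s := string.toList
  let n : Int := s.length
  let kevin := (PySem.List.enumerate s 0).foldl
    (fun acc ic => if PySem.Chars.isIn [ic.2] "AEIOU".toList then acc + (n - ic.1) else acc) 0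
  let stuart := PySem.Int.floordiv (n * (n + 1)) 2 - kevin
  if kevin > stuart then String.ofList ("Kevin ".toList ++ PySem.Int.toChars kevin)
  else if kevin < stuart then String.ofList ("Stuart ".toList ++ PySem.Int.toChars stuart)
  else "Draw"

-- ===== PRECONDITION & SPEC =====
def Spec_minion_game (string : String) (out : String) : Prop := out = minion_game_alt string
instance (string : String) (out : String) : Decidable (Spec_minion_game string out) := by unfold Spec_minion_game; infer_instance

-- ===== CLAIM (what is proved, stated in full; the proofs are below) =====
def Claim_equal_minion_game : Prop := ∀ (string : String), Dom_minion_game string → Spec_minion_game string (minion_game string)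

-- ===== LEMMAS AND PROOFS =====

-- total value mass of a dictionary
def pvVsum (d : PySem.Dict (List Char) Int) : Int := d.values.sum

-- A's vowel test (list membership) and B's (substring of "AEIOU") agree
lemma pvVowel_eq (c : Char) :
    (['A', 'E', 'I', 'O', 'U'].contains c) = PySem.Chars.isIn [c] "AEIOU".toList := by
  have h1 : ("AEIOU".toList) = ['A', 'E', 'I', 'O', 'U'] := rfl
  rw [h1, Bool.eq_iff_iff, List.contains_iff_mem, PySem.Chars.isIn_iff_infix,
    List.singleton_infix_iff]

lemma pvIncr_nodup (d : PySem.Dict (List Char) Int) (k : List Char) (h : d.keys.Nodup) :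
    (pvIncr d k).keys.Nodup := by
  unfold pvIncr; split_ifs <;> exact PySem.Dict.nodup_keys_insert _ _ _ h

-- each increment adds exactly 1 to the value mass
lemma pvVsum_incr (d : PySem.Dict (List Char) Int) (k : List Char) (h : d.keys.Nodup) :
    pvVsum (pvIncr d k) = pvVsum d + 1 := by
  unfold pvIncr
  split_ifs with hc
  · -- k already present: one item's value is replaced by its successor
    have hk : k ∈ d.items.map (·.1) := (PySem.Dict.contains_iff_mem_keys d k).mp hc
    obtain ⟨p, hp, hpk⟩ := List.mem_map.mp hk
    have hkv : (k, p.2) ∈ d.items := by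
      have : p = (k, p.2) := by cases p; simp_all
      rwa [this] at hp
    have hgd : d.getD k 0 = p.2 := PySem.Dict.getD_of_mem_items d hkv h 0
    obtain ⟨l1, l2, hsplit⟩ := List.append_of_mem hkv
    have hnd : ((l1 ++ (k, p.2) :: l2).map (·.1)).Nodup := by
      show ((l1 ++ (k, p.2) :: l2).map (·.1)).Nodup
      rw [← hsplit]; exact h
    rw [List.map_append, List.map_cons, List.nodup_append] at hnd
    obtain ⟨hnd1, hnd2, hdisj⟩ := hnd
    have hl1 : ∀ q ∈ l1, q.1 ≠ k := by
      intro q hq hqk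
      exact hdisj q.1 (List.mem_map_of_mem hq) ((k, p.2).1) (List.mem_cons_self ..) hqk
    have hl2 : ∀ q ∈ l2, q.1 ≠ k := by
      intro q hq hqk
      have hm : q.1 ∈ List.map (fun x => x.1) l2 := List.mem_map_of_mem hq
      rw [hqk] at hm
      exact (List.nodup_cons.mp hnd2).1 hm
    unfold pvVsum
    show ((d.insert k (d.getD k 0 + 1)).items.map (·.2)).sum = (d.items.map (·.2)).sum + 1
    rw [PySem.Dict.items_insert_of_contains d _ hc, hsplit]
    have hm1 : ∀ q ∈ l1, (if (q.1 == k) = true then (k, d.getD k 0 + 1) else q) = q := by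
      intro q hq; simp [hl1 q hq]
    have hm2 : ∀ q ∈ l2, (if (q.1 == k) = true then (k, d.getD k 0 + 1) else q) = q := by
      intro q hq; simp [hl2 q hq]
    simp only [List.map_append, List.map_cons, List.sum_append, List.sum_cons,
      List.map_congr_left hm1, List.map_congr_left hm2, List.map_id_fun', id]
    simp [hgd]
    ring
  · unfold pvVsum
    show ((d.insert k 1).items.map (·.2)).sum = (d.items.map (·.2)).sum + 1
    rw [PySem.Dict.items_insert_of_not_contains d _ (by simpa using hc)]
    simp

lemma pvFold_incr_nodup (l : List (List Char)) (d : PySem.Dict (List Char) Int)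
    (h : d.keys.Nodup) : (l.foldl pvIncr d).keys.Nodup := by
  induction l generalizing d with
  | nil => exact h
  | cons x xs ih => exact ih _ (pvIncr_nodup d x h)

lemma pvVsum_fold_incr (l : List (List Char)) (d : PySem.Dict (List Char) Int)
    (h : d.keys.Nodup) : pvVsum (l.foldl pvIncr d) = pvVsum d + l.length := by
  induction l generalizing d with
  | nil => simp
  | cons x xs ih =>
    simp only [List.foldl_cons, List.length_cons]
    rw [ih _ (pvIncr_nodup d x h), pvVsum_incr d x h]
    push_cast; ring

lemma pvAddToDict_nodup (d : PySem.Dict (List Char) Int) (ch : Char) (i : Int)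
    (s : List Char) (h : d.keys.Nodup) : (pvAddToDict d ch i s).keys.Nodup :=
  pvFold_incr_nodup _ _ (pvIncr_nodup d [ch] h)

-- one add_to_dict call at index i adds exactly n - i to the value mass
lemma pvVsum_addToDict (d : PySem.Dict (List Char) Int) (ch : Char) (i : Int)
    (s : List Char) (h : d.keys.Nodup) (h0 : 0 ≤ i) (hn : i < (s.length : Int)) :
    pvVsum (pvAddToDict d ch i s) = pvVsum d + ((s.length : Int) - i) := by
  unfold pvAddToDict
  rw [pvVsum_fold_incr _ _ (pvIncr_nodup d [ch] h), pvVsum_incr d [ch] h]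
  have hlen : (pvGetAllSubstrings (PySem.List.slice s (some i) none)).length
      = (((PySem.List.slice s (some i) none).length : Int) - 1).toNat := by
    unfold pvGetAllSubstrings
    rw [List.length_map, PySem.List.length_pyRange_one]
    congr 1; omega
  rw [hlen, PySem.List.slice_from s h0, List.length_drop]
  omega

-- the A-side fold step
def pvStepA (s : List Char)
    (p : PySem.Dict (List Char) Int × PySem.Dict (List Char) Int) (ic : Int × Char) :
    PySem.Dict (List Char) Int × PySem.Dict (List Char) Int :=
  if ['A', 'E', 'I', 'O', 'U'].contains ic.2 then (p.1, pvAddToDict p.2 ic.2 ic.1 s)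
  else (pvAddToDict p.1 ic.2 ic.1 s, p.2)

-- the two mathematical sums the folds compute
def pvKSum (n : Int) (l : List (Int × Char)) : Int :=
  ((l.filter (fun ic => ['A', 'E', 'I', 'O', 'U'].contains ic.2)).map (fun ic => n - ic.1)).sum
def pvSSum (n : Int) (l : List (Int × Char)) : Int :=
  ((l.filter (fun ic => !(['A', 'E', 'I', 'O', 'U'].contains ic.2))).map (fun ic => n - ic.1)).sum

lemma pvFoldA_spec (s : List Char) (l : List (Int × Char))
    (hl : ∀ ic ∈ l, 0 ≤ ic.1 ∧ ic.1 < (s.length : Int))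
    (st kv : PySem.Dict (List Char) Int) (hst : st.keys.Nodup) (hkv : kv.keys.Nodup) :
    pvVsum (l.foldl (pvStepA s) (st, kv)).1 = pvVsum st + pvSSum (s.length : Int) l ∧
    pvVsum (l.foldl (pvStepA s) (st, kv)).2 = pvVsum kv + pvKSum (s.length : Int) l := by
  induction l generalizing st kv with
  | nil => simp [pvKSum, pvSSum]
  | cons ic xs ih =>
    have hb := hl ic (List.mem_cons_self ..)
    have htl : ∀ jc ∈ xs, 0 ≤ jc.1 ∧ jc.1 < (s.length : Int) :=
      fun jc hj => hl jc (List.mem_cons_of_mem _ hj)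
    simp only [List.foldl_cons, pvStepA]
    split_ifs with hv
    · obtain ⟨h1, h2⟩ := ih htl st (pvAddToDict kv ic.2 ic.1 s) hst
        (pvAddToDict_nodup kv ic.2 ic.1 s hkv)
      rw [h1, h2, pvVsum_addToDict kv ic.2 ic.1 s hkv hb.1 hb.2]
      constructor
      · unfold pvSSum; rw [List.filter_cons, if_neg (by rw [hv]; decide)]
      · unfold pvKSum; rw [List.filter_cons, if_pos hv]
        simp only [List.map_cons, List.sum_cons]; ring
    · have hvb : (['A', 'E', 'I', 'O', 'U'].contains ic.2) = false := by simpa using hv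
      obtain ⟨h1, h2⟩ := ih htl (pvAddToDict st ic.2 ic.1 s) kv
        (pvAddToDict_nodup st ic.2 ic.1 s hst) hkv
      rw [h1, h2, pvVsum_addToDict st ic.2 ic.1 s hst hb.1 hb.2]
      constructor
      · unfold pvSSum; rw [List.filter_cons, if_pos (by rw [hvb]; decide)]
        simp only [List.map_cons, List.sum_cons]; ring
      · unfold pvKSum; rw [List.filter_cons, if_neg (by rw [hvb]; decide)]

-- B's fold computes pvKSum
lemma pvFoldB_spec (n : Int) (l : List (Int × Char)) (acc : Int) :
    l.foldl (fun acc ic => if PySem.Chars.isIn [ic.2] "AEIOU".toList then acc + (n - ic.1) else acc) acc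
      = acc + pvKSum n l := by
  induction l generalizing acc with
  | nil => simp [pvKSum]
  | cons ic xs ih =>
    rw [List.foldl_cons, ih, ← pvVowel_eq ic.2]
    by_cases hv : (['A', 'E', 'I', 'O', 'U'].contains ic.2) = true
    · rw [if_pos hv]
      unfold pvKSum; rw [List.filter_cons, if_pos hv]
      simp only [List.map_cons, List.sum_cons]; ring
    · rw [if_neg hv]
      unfold pvKSum; rw [List.filter_cons, if_neg hv]

lemma pvSumEnum (n : Int) (l : List Char) : ∀ j : Int,
    2 * ((PySem.List.enumerate l j).map (fun ic => n - ic.1)).sum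
      = l.length * (2 * n - 2 * j - l.length + 1) := by
  induction l with
  | nil => intro j; simp
  | cons c cs ih =>
    intro j
    rw [PySem.List.enumerate_cons]
    simp only [List.map_cons, List.sum_cons, List.length_cons]
    rw [mul_add, ih (j + 1)]
    push_cast; ring

-- Gauss: the total mass over all start indices is n(n+1)//2
lemma pvTotal (s : List Char) :
    pvKSum (s.length : Int) (PySem.List.enumerate s 0)
      + pvSSum (s.length : Int) (PySem.List.enumerate s 0)
      = PySem.Int.floordiv ((s.length : Int) * ((s.length : Int) + 1)) 2 := by
  have hsplit : pvKSum (s.length : Int) (PySem.List.enumerate s 0)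
      + pvSSum (s.length : Int) (PySem.List.enumerate s 0)
      = ((PySem.List.enumerate s 0).map (fun ic => (s.length : Int) - ic.1)).sum := by
    unfold pvKSum pvSSum
    induction (PySem.List.enumerate s 0) with
    | nil => simp
    | cons ic xs ih =>
      by_cases hv : (['A', 'E', 'I', 'O', 'U'].contains ic.2) = true
      · rw [List.filter_cons, List.filter_cons, if_pos hv,
          if_neg (by rw [hv]; decide)]
        simp only [List.map_cons, List.sum_cons]
        rw [← ih]; ring
      · have hvb : (['A', 'E', 'I', 'O', 'U'].contains ic.2) = false := by simpa using hv
        rw [List.filter_cons, List.filter_cons, if_neg (by rw [hvb]; decide),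
          if_pos (by rw [hvb]; decide)]
        simp only [List.map_cons, List.sum_cons]
        rw [← ih]; ring
  rw [hsplit]
  have h2 := pvSumEnum (s.length : Int) s 0
  have h3 : (s.length : Int) * ((s.length : Int) + 1)
      = 2 * ((PySem.List.enumerate s 0).map (fun ic => (s.length : Int) - ic.1)).sum := by
    rw [h2]; ring
  rw [h3, PySem.Int.floordiv_eq_ediv_of_pos (by norm_num)]
  omega

lemma pvEnumerate_bounds (s : List Char) :
    ∀ ic ∈ PySem.List.enumerate s 0, 0 ≤ ic.1 ∧ ic.1 < (s.length : Int) := by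
  intro ic h
  have hm : ic.1 ∈ (PySem.List.enumerate s 0).map (·.1) := List.mem_map_of_mem h
  rw [PySem.List.map_fst_enumerate, PySem.List.mem_pyRange_one] at hm
  omega

-- ===== VERDICT (by name: the statement is the Claim_ definition above) =====
theorem minion_game_spec : Claim_equal_minion_game := by
  intro string _
  show minion_game string = minion_game_alt string
  unfold minion_game minion_game_alt
  dsimp only
  have hA := pvFoldA_spec string.toList (PySem.List.enumerate string.toList 0)
    (pvEnumerate_bounds string.toList) PySem.Dict.empty PySem.Dict.empty
    PySem.Dict.nodup_keys_empty PySem.Dict.nodup_keys_empty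
  have hB := pvFoldB_spec (string.toList.length : Int) (PySem.List.enumerate string.toList 0) 0
  have hT := pvTotal string.toList
  unfold pvStepA pvVsum at hA
  rw [hA.1, hA.2, hB]
  have hE : (PySem.Dict.empty : PySem.Dict (List Char) Int).values.sum = 0 := rfl
  rw [hE]
  have hS : pvSSum (string.toList.length : Int) (PySem.List.enumerate string.toList 0)
      = PySem.Int.floordiv ((string.toList.length : Int) * ((string.toList.length : Int) + 1)) 2
        - pvKSum (string.toList.length : Int) (PySem.List.enumerate string.toList 0) := by
    omega
  rw [hS]
  ring_nf
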